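-- pv_equiv track=rewrite | github.com/igorktech/FRAMES-Corpus | frames_utilities.py | get_users_for_fold
-- ===== SOURCE A (Python) =====
-- def get_users_for_fold(fold):
--     folds = {'U21E41CQP': 1,
--              'U23KPC9QV': 1,
--              'U21RP4FCY': 2,
--              'U22HTHYNP': 3,
--              'U22K1SX9N': 4,
--              'U231PNNA3': 5,
--              'U23KR88NT': 6,
--              'U24V2QUKC': 7,
--              'U260BGVS6': 8,
--              'U2709166N': 9,
--              'U2AMZ8TLK': 10}
--
--     if fold < 0:
--         split = [k for k, v in folds.items() if v != -fold]
--     else: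
--         split = [k for k, v in folds.items() if v == fold]
--     return split
-- ===== SOURCE B (Python) =====
-- def get_users_for_fold(fold):
--     groups = {1: ['U21E41CQP', 'U23KPC9QV'],
--               2: ['U21RP4FCY'],
--               3: ['U22HTHYNP'],
--               4: ['U22K1SX9N'],
--               5: ['U231PNNA3'],
--               6: ['U23KR88NT'],
--               7: ['U24V2QUKC'],
--               8: ['U260BGVS6'],
--               9: ['U2709166N'],
--               10: ['U2AMZ8TLK']}
--     if fold < 0:
--         return [u for k in groups if k != -fold for u in groups[k]]
--     return groups.get(fold, [])
-- ===== Notes on version B (the rewrite author's own statement) =====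
-- stated objective: idiomatic
-- what changed: B replaces A's flat user->fold dict scanned with a filter by an inverted index fold->list-of-users: a non-negative fold is answered by a single dict lookup (groups.get(fold, [])) and a negative fold by flattening the other groups in ascending key order.
import Mathlib
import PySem

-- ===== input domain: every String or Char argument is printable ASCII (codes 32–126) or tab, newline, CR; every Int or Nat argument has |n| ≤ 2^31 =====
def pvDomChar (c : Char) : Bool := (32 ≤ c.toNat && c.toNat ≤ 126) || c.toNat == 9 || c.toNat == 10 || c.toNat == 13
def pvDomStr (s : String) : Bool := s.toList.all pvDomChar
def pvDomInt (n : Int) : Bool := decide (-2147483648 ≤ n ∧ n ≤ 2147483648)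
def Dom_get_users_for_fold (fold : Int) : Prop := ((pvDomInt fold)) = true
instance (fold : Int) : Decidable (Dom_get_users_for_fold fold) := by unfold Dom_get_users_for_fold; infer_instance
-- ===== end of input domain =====

-- B restructures the constant mapping as an inverted index (fold → users) so a
-- non-negative fold is answered by direct lookup instead of a scan (objective: idiomatic/alternative).

-- ===== PORT A =====
-- the dict user -> fold, in Python insertion order
def foldsA : PySem.Dict String Int :=
  PySem.Dict.mk
    [("U21E41CQP", 1), ("U23KPC9QV", 1), ("U21RP4FCY", 2), ("U22HTHYNP", 3),
     ("U22K1SX9N", 4), ("U231PNNA3", 5), ("U23KR88NT", 6), ("U24V2QUKC", 7),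
     ("U260BGVS6", 8), ("U2709166N", 9), ("U2AMZ8TLK", 10)]

def get_users_for_fold (fold : Int) : List String :=
  if fold < 0 then
    (foldsA.items.filter (fun kv => kv.2 ≠ -fold)).map Prod.fst
  else
    (foldsA.items.filter (fun kv => kv.2 = fold)).map Prod.fst

-- ===== PORT B =====
-- the inverted index fold -> users, in Python insertion order
def groupsB : PySem.Dict Int (List String) :=
  PySem.Dict.mk
    [(1, ["U21E41CQP", "U23KPC9QV"]), (2, ["U21RP4FCY"]), (3, ["U22HTHYNP"]),
     (4, ["U22K1SX9N"]), (5, ["U231PNNA3"]), (6, ["U23KR88NT"]),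
     (7, ["U24V2QUKC"]), (8, ["U260BGVS6"]), (9, ["U2709166N"]), (10, ["U2AMZ8TLK"])]

def get_users_for_fold_alt (fold : Int) : List String :=
  if fold < 0 then
    (groupsB.items.filter (fun g => g.1 ≠ -fold)).flatMap Prod.snd
  else
    PySem.Dict.getD groupsB fold []

-- ===== PRECONDITION & SPEC =====
def Spec_get_users_for_fold (fold : Int) (out : List String) : Prop := out = get_users_for_fold_alt fold
instance (fold : Int) (out : List String) : Decidable (Spec_get_users_for_fold fold out) := by unfold Spec_get_users_for_fold; infer_instance

-- ===== CLAIM (what is proved, stated in full; the proofs are below) =====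
def Claim_equal_get_users_for_fold : Prop := ∀ (fold : Int), Dom_get_users_for_fold fold → Spec_get_users_for_fold fold (get_users_for_fold fold)

-- ===== LEMMAS AND PROOFS =====

-- for fold > 10 both sides return []
theorem pv_big_pos (fold : Int) (h : 10 < fold) :
    get_users_for_fold fold = get_users_for_fold_alt fold := by
  have hb : ∀ a b : Int, (a == b) = decide (a = b) := fun _ _ => rfl
  have h1 : decide ((1:Int) = fold) = false := decide_eq_false (by omega)
  have h2 : decide ((2:Int) = fold) = false := decide_eq_false (by omega)
  have h3 : decide ((3:Int) = fold) = false := decide_eq_false (by omega)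
  have h4 : decide ((4:Int) = fold) = false := decide_eq_false (by omega)
  have h5 : decide ((5:Int) = fold) = false := decide_eq_false (by omega)
  have h6 : decide ((6:Int) = fold) = false := decide_eq_false (by omega)
  have h7 : decide ((7:Int) = fold) = false := decide_eq_false (by omega)
  have h8 : decide ((8:Int) = fold) = false := decide_eq_false (by omega)
  have h9 : decide ((9:Int) = fold) = false := decide_eq_false (by omega)
  have h10 : decide ((10:Int) = fold) = false := decide_eq_false (by omega)
  unfold get_users_for_fold get_users_for_fold_alt foldsA groupsB
  rw [if_neg (by omega), if_neg (by omega)]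
  simp [PySem.Dict.getD, PySem.Dict.get?, hb, h1, h2, h3, h4, h5, h6, h7, h8, h9, h10]

-- for fold < -10 both sides return all eleven users in order
theorem pv_big_neg (fold : Int) (h : fold < -10) :
    get_users_for_fold fold = get_users_for_fold_alt fold := by
  have h1 : decide ((1:Int) = -fold) = false := decide_eq_false (by omega)
  have h2 : decide ((2:Int) = -fold) = false := decide_eq_false (by omega)
  have h3 : decide ((3:Int) = -fold) = false := decide_eq_false (by omega)
  have h4 : decide ((4:Int) = -fold) = false := decide_eq_false (by omega)
  have h5 : decide ((5:Int) = -fold) = false := decide_eq_false (by omega)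
  have h6 : decide ((6:Int) = -fold) = false := decide_eq_false (by omega)
  have h7 : decide ((7:Int) = -fold) = false := decide_eq_false (by omega)
  have h8 : decide ((8:Int) = -fold) = false := decide_eq_false (by omega)
  have h9 : decide ((9:Int) = -fold) = false := decide_eq_false (by omega)
  have h10 : decide ((10:Int) = -fold) = false := decide_eq_false (by omega)
  unfold get_users_for_fold get_users_for_fold_alt foldsA groupsB
  rw [if_pos (by omega), if_pos (by omega)]
  simp [h1, h2, h3, h4, h5, h6, h7, h8, h9, h10]

-- ===== VERDICT (by name: the statement is the Claim_ definition above) =====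
theorem get_users_for_fold_spec : Claim_equal_get_users_for_fold := by
  intro fold _
  unfold Spec_get_users_for_fold
  by_cases hrange : -10 ≤ fold ∧ fold ≤ 10
  · obtain ⟨ha, hb⟩ := hrange
    interval_cases fold <;> decide
  · rcases (by omega : fold < -10 ∨ 10 < fold) with h | h
    · exact pv_big_neg fold h
    · exact pv_big_pos fold h
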